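-- pv_equiv track=rewrite | github.com/aidanGoesch/NeSyPaperGraph | backend/services/verification.py | find_optimal_topic_merge
-- ===== SOURCE A (Python) =====
-- def find_optimal_topic_merge(topics: list, topic_synonyms: dict) -> dict:
--     """Returns a dict mapping group_id -> list of topics in that group."""
--
--     # Union-Find data structure
--     parent = {topic: topic for topic in topics}
--
--     def find(topic):
--         if parent[topic] == topic:
--             return topic
--         parent[topic] = find(parent[topic])  # Path compression
--         return parent[topic]
--
--     def union(topic_a, topic_b):
--         root_a = find(topic_a)
--         root_b = find(topic_b)
--         if root_a != root_b:
--             parent[root_a] = root_b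
--
--     # Union all synonym pairs
--     for topic_a, synonym_list in topic_synonyms.items():
--         if topic_a not in topics:
--             continue
--         for topic_b in synonym_list:
--             if topic_b not in topics:
--                 continue
--             union(topic_a, topic_b)
--
--     # Group topics by their root
--     groups = {}
--     for topic in topics:
--         root = find(topic)
--         if root not in groups:
--             groups[root] = []
--         groups[root].append(topic)
--
--     # Convert to indexed format
--     return {i: topic_list for i, topic_list in enumerate(groups.values())}
-- ===== SOURCE B (Python) =====
-- def find_optimal_topic_merge(topics: list, topic_synonyms: dict) -> dict:
--     """Returns a dict mapping group_id -> list of topics in that group."""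
--     # Eager label propagation instead of union-find: comp[t] is t's current
--     # component label; merging an edge rewrites every label of one class.
--     comp = {t: t for t in topics}
--
--     for topic_a, synonym_list in topic_synonyms.items():
--         if topic_a not in topics:
--             continue
--         for topic_b in synonym_list:
--             if topic_b not in topics:
--                 continue
--             ra, rb = comp[topic_a], comp[topic_b]
--             if ra != rb:
--                 for k in comp:
--                     if comp[k] == ra:
--                         comp[k] = rb
--
--     groups = {}
--     for t in topics:
--         groups.setdefault(comp[t], []).append(t)
--
--     return dict(enumerate(groups.values()))
-- ===== Notes on version B (the rewrite author's own statement) =====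
-- stated objective: alternative
-- what changed: Replaces the recursive path-compressing union-find by eager label propagation: each merge rewrites every label of one class in a flat comp dict, so there is no recursion, no parent forest and no path compression; the final bucketing over topics is kept so group and member order match exactly.
import Mathlib
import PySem

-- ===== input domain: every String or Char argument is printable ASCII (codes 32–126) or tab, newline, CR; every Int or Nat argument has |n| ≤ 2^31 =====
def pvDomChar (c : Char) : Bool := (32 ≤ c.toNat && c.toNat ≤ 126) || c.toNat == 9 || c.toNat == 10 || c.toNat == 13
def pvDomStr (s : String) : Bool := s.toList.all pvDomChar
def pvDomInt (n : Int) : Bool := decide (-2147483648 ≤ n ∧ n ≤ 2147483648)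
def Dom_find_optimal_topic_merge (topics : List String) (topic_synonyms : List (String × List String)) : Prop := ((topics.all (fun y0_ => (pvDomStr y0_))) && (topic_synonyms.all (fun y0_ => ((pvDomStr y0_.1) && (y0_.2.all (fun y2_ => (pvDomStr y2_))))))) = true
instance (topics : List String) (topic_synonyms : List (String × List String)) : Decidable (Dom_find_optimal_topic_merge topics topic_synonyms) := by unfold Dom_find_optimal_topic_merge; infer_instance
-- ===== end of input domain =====

-- B replaces A's recursive path-compressing union-find by eager label propagation
-- (each merge rewrites every label of one class in a flat dict) — objective: alternative.

-- ===== PORT A =====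
-- def find(topic), with path compression, threading the mutated parent dict.
-- fuel = len(topics)+1 bounds the parent-chain length (the parent map is an acyclic
-- forest on at most len(topics) keys), so the fuel guard is never reached on inputs
-- A accepts; parent[t] is read as `getD t t`, exact because every access is at a key.
def pvFind : Nat → PySem.Dict String String → String → PySem.Dict String String × String
  | 0, p, t => (p, t)
  | n+1, p, t =>
    let pt := p.getD t t
    if pt = t then (p, t)
    else
      let pr := pvFind n p pt
      (pr.1.insert t pr.2, pr.2)

-- def union(topic_a, topic_b)
def pvUnion (fuel : Nat) (p : PySem.Dict String String) (a b : String) : PySem.Dict String String :=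
  let fa := pvFind fuel p a
  let fb := pvFind fuel fa.1 b
  if fa.2 ≠ fb.2 then fb.1.insert fa.2 fb.2 else fb.1

def find_optimal_topic_merge (topics : List String) (topic_synonyms : List (String × List String)) : List (Int × List String) :=
  let fuel := topics.length + 1
  -- parent = {topic: topic for topic in topics}
  let parent0 := topics.foldl (fun d t => d.insert t t) PySem.Dict.empty
  let parent1 := (PySem.Dict.ofList topic_synonyms).items.foldl
    (fun p al =>
      if topics.contains al.1 then
        al.2.foldl (fun p b => if topics.contains b then pvUnion fuel p al.1 b else p) p
      else p) parent0
  let st := topics.foldl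
    (fun (s : PySem.Dict String String × PySem.Dict String (List String)) t =>
      let fr := pvFind fuel s.1 t
      let g := if s.2.contains fr.2 then s.2 else s.2.insert fr.2 []
      (fr.1, g.modify fr.2 [] (fun l => l ++ [t]))) (parent1, PySem.Dict.empty)
  PySem.List.enumerate st.2.values


-- ===== PORT B =====
-- for k in comp: if comp[k] == ra: comp[k] = rb   (values-only rewrite, keys unchanged)
def pvRelabel (c : PySem.Dict String String) (ra rb : String) : PySem.Dict String String :=
  PySem.Dict.mk (c.items.map (fun kv => (kv.1, if kv.2 = ra then rb else kv.2)))

def pvMerge (c : PySem.Dict String String) (a b : String) : PySem.Dict String String :=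
  let ra := c.getD a a   -- comp[a]; a is always a key here, so getD is Python's comp[a]
  let rb := c.getD b b
  if ra ≠ rb then pvRelabel c ra rb else c

def find_optimal_topic_merge_alt (topics : List String) (topic_synonyms : List (String × List String)) : List (Int × List String) :=
  let comp0 := topics.foldl (fun d t => d.insert t t) PySem.Dict.empty
  let comp := (PySem.Dict.ofList topic_synonyms).items.foldl
    (fun c al =>
      if topics.contains al.1 then
        al.2.foldl (fun c b => if topics.contains b then pvMerge c al.1 b else c) c
      else c) comp0
  let groups := topics.foldl
    (fun (g : PySem.Dict String (List String)) t =>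
      let r := comp.getD t t
      (g.setdefault r []).modify r [] (fun l => l ++ [t])) PySem.Dict.empty
  PySem.List.enumerate groups.values


-- ===== PRECONDITION & SPEC =====
def Spec_find_optimal_topic_merge (topics : List String) (topic_synonyms : List (String × List String)) (out : List (Int × List String)) : Prop := out = find_optimal_topic_merge_alt topics topic_synonyms
instance (topics : List String) (topic_synonyms : List (String × List String)) (out : List (Int × List String)) : Decidable (Spec_find_optimal_topic_merge topics topic_synonyms out) := by unfold Spec_find_optimal_topic_merge; infer_instance

-- ===== CLAIM (what is proved, stated in full; the proofs are below) =====
def Claim_equal_find_optimal_topic_merge : Prop := ∀ (topics : List String) (topic_synonyms : List (String × List String)), Dom_find_optimal_topic_merge topics topic_synonyms → Spec_find_optimal_topic_merge topics topic_synonyms (find_optimal_topic_merge topics topic_synonyms)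

-- ===== LEMMAS AND PROOFS =====

def pvRootF : Nat → PySem.Dict String String → String → Option String
  | 0, _, _ => none
  | n+1, p, t =>
    let pt := p.getD t t
    if pt = t then some t else pvRootF n p pt

def pvInv (ts : List String) (p : PySem.Dict String String) (rk : String → Nat) : Prop :=
  ∀ t ∈ ts, p.getD t t ∈ ts ∧ (p.getD t t = t ∨ rk (p.getD t t) < rk t)

def pvRoot (ts : List String) (p : PySem.Dict String String) (t : String) : Option String :=
  pvRootF (ts.length + 1) p t

lemma pvRootF_mono {p : PySem.Dict String String} :
    ∀ {n m : Nat} {t r : String}, pvRootF n p t = some r → n ≤ m → pvRootF m p t = some r := by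
  intro n
  induction n with
  | zero => intro m t r h; simp [pvRootF] at h
  | succ k ih =>
    intro m t r h hle
    match m, hle with
    | m+1, hle =>
      simp only [pvRootF] at h ⊢
      split at h
      · simp [*]
      · simp only [*]
        exact ih h (by omega)

lemma pvRootF_det {p : PySem.Dict String String} {n m : Nat} {t r s : String}
    (h1 : pvRootF n p t = some r) (h2 : pvRootF m p t = some s) : r = s := by
  have a1 := pvRootF_mono h1 (Nat.le_max_left n m)
  have a2 := pvRootF_mono h2 (Nat.le_max_right n m)
  rw [a1] at a2; exact Option.some_inj.mp a2

lemma pvRootF_isRoot {p : PySem.Dict String String} :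
    ∀ {n : Nat} {t r : String}, pvRootF n p t = some r → p.getD r r = r := by
  intro n
  induction n with
  | zero => intro t r h; simp [pvRootF] at h
  | succ k ih =>
    intro t r h
    simp only [pvRootF] at h
    split at h
    · obtain rfl := Option.some_inj.mp h; assumption
    · exact ih h

lemma pvRootF_mem {ts : List String} {p : PySem.Dict String String} {rk : String → Nat}
    (hin : pvInv ts p rk) :
    ∀ {n : Nat} {t r : String}, t ∈ ts → pvRootF n p t = some r → r ∈ ts := by
  intro n
  induction n with
  | zero => intro t r _ h; simp [pvRootF] at h
  | succ k ih =>
    intro t r ht h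
    simp only [pvRootF] at h
    split at h
    · obtain rfl := Option.some_inj.mp h; assumption
    · exact ih (hin t ht).1 h

lemma pvRootF_rk_le {ts : List String} {p : PySem.Dict String String} {rk : String → Nat}
    (hin : pvInv ts p rk) :
    ∀ {n : Nat} {t r : String}, t ∈ ts → pvRootF n p t = some r → rk r ≤ rk t := by
  intro n
  induction n with
  | zero => intro t r _ h; simp [pvRootF] at h
  | succ k ih =>
    intro t r ht h
    simp only [pvRootF] at h
    split at h
    · obtain rfl := Option.some_inj.mp h; exact le_refl _
    · have h2 := (hin t ht).2
      rcases h2 with h2 | h2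
      · exact absurd h2 ‹¬_›
      · exact le_trans (ih (hin t ht).1 h) (Nat.le_of_lt h2)

lemma pvCountP_lt {α : Type} (l : List α) (p q : α → Bool)
    (himp : ∀ a ∈ l, p a = true → q a = true) (a : α) (ha : a ∈ l)
    (hq : q a = true) (hp : p a = false) : l.countP p < l.countP q := by
  induction l with
  | nil => simp at ha
  | cons x xs ih =>
    have hle : xs.countP p ≤ xs.countP q :=
      List.countP_mono_left (fun b hb => himp b (List.mem_cons_of_mem _ hb))
    rcases List.mem_cons.mp ha with rfl | ha'
    · simp only [List.countP_cons, hp, hq]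
      simp; omega
    · have hstrict := ih (fun b hb h => himp b (List.mem_cons_of_mem _ hb) h) ha'
      by_cases hpx : p x = true
      · have hqx : q x = true := himp x List.mem_cons_self hpx
        simp only [List.countP_cons, hpx, hqx]; simp; omega
      · simp only [Bool.not_eq_true] at hpx
        simp only [List.countP_cons, hpx]
        by_cases hqx : q x = true <;> simp [hqx] <;> omega

lemma pvRoot_isSome {ts : List String} {p : PySem.Dict String String} {rk : String → Nat}
    (hin : pvInv ts p rk) {t : String} (ht : t ∈ ts) :
    ∃ r, pvRoot ts p t = some r := by
  have key : ∀ (n : Nat) (t : String), t ∈ ts →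
      ts.dedup.countP (fun u => rk u < rk t) ≤ n → ∃ r, pvRootF (n+1) p t = some r := by
    intro n
    induction n with
    | zero =>
      intro t ht hb
      by_cases hr : p.getD t t = t
      · exact ⟨t, by simp [pvRootF, hr]⟩
      · exfalso
        rcases (hin t ht).2 with h2 | h2
        · exact hr h2
        · have hy : p.getD t t ∈ ts := (hin t ht).1
          have hlt : ts.dedup.countP (fun u => rk u < rk (p.getD t t))
              < ts.dedup.countP (fun u => rk u < rk t) := by
            refine pvCountP_lt ts.dedup _ _ ?_ (p.getD t t) (List.mem_dedup.mpr hy) ?_ ?_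
            · intro a _ hpa; simp only [decide_eq_true_eq] at hpa ⊢; omega
            · simp only [decide_eq_true_eq]; exact h2
            · simp
          omega
    | succ k ih =>
      intro t ht hb
      by_cases hr : p.getD t t = t
      · exact ⟨t, by simp [pvRootF, hr]⟩
      · rcases (hin t ht).2 with h2 | h2
        · exact absurd h2 hr
        · have hy : p.getD t t ∈ ts := (hin t ht).1
          have hlt : ts.dedup.countP (fun u => rk u < rk (p.getD t t))
              < ts.dedup.countP (fun u => rk u < rk t) := by
            refine pvCountP_lt ts.dedup _ _ ?_ (p.getD t t) (List.mem_dedup.mpr hy) ?_ ?_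
            · intro a _ hpa; simp only [decide_eq_true_eq] at hpa ⊢; omega
            · simp only [decide_eq_true_eq]; exact h2
            · simp
          obtain ⟨r, hr'⟩ := ih (p.getD t t) hy (by omega)
          exact ⟨r, by simp only [pvRootF, if_neg hr]; exact hr'⟩
  have hb : ts.dedup.countP (fun u => rk u < rk t) ≤ ts.length :=
    le_trans List.countP_le_length (List.Sublist.length_le ts.dedup_sublist)
  exact key ts.length t ht hb

lemma pvRootF_insert_pres {q : PySem.Dict String String} {t r : String} {k : Nat}
    (hroot : pvRootF k q t = some r) :
    ∀ {m : Nat} {x s : String}, pvRootF m q x = some s → pvRootF m (q.insert t r) x = some s := by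
  have hrr : q.getD r r = r := pvRootF_isRoot hroot
  intro m
  induction m with
  | zero => intro x s h; simp [pvRootF] at h
  | succ m' ih =>
    intro x s h
    by_cases hxt : x = t
    · subst hxt
      have hsr : s = r := pvRootF_det h hroot
      rw [hsr] at h ⊢
      simp only [pvRootF] at h ⊢
      by_cases hstep : q.getD x x = x
      · rw [if_pos hstep] at h
        obtain rfl := Option.some_inj.mp h
        simp
      · rw [if_neg hstep] at h
        have hrx : r ≠ x := by
          intro hrx; exact hstep (hrx ▸ hrr)
        have hgd : (q.insert x r).getD x x = r := by
          simp
        rw [hgd, if_neg (fun hh => hrx hh)]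
        match m', h with
        | m''+1, h =>
          have hgr : (q.insert x r).getD r r = r := by
            simp [PySem.Dict.getD_insert, hrx, hrr]
          simp [pvRootF, hgr]
    · simp only [pvRootF] at h ⊢
      have hgd : (q.insert t r).getD x x = q.getD x x := by
        simp [PySem.Dict.getD_insert, hxt]
      rw [hgd]
      split at h
      · simp [*]
      · rw [if_neg ‹¬_›]
        exact ih h

lemma pvFind_spec {ts : List String} {rk : String → Nat} :
    ∀ (n : Nat) (p : PySem.Dict String String) (t r : String),
      pvInv ts p rk → t ∈ ts → pvRootF n p t = some r →
      (pvFind n p t).2 = r ∧ pvInv ts (pvFind n p t).1 rk ∧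
      (∀ (m : Nat) (x s : String), pvRootF m p x = some s → pvRootF m (pvFind n p t).1 x = some s) := by
  intro n
  induction n with
  | zero => intro p t r _ _ h; simp [pvRootF] at h
  | succ k ih =>
    intro p t r hin ht h
    simp only [pvRootF] at h
    by_cases hstep : p.getD t t = t
    · rw [if_pos hstep] at h
      obtain rfl := Option.some_inj.mp h
      refine ⟨by simp [pvFind, hstep], by simpa [pvFind, hstep] using hin, ?_⟩
      intro m x s hx; simpa [pvFind, hstep] using hx
    · rw [if_neg hstep] at h
      have hpt : p.getD t t ∈ ts := (hin t ht).1
      obtain ⟨hval, hinv1, hpres1⟩ := ih p (p.getD t t) r hin hpt h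
      have ht1 : pvRootF (k+1) p t = some r := by
        simp only [pvRootF, if_neg hstep]; exact h
      have hroot1 : pvRootF (k+1) (pvFind k p (p.getD t t)).1 t = some r := hpres1 (k+1) t r ht1
      refine ⟨by simp [pvFind, hstep, hval], ?_, ?_⟩
      · simp only [pvFind, if_neg hstep]
        intro u hu
        by_cases hut : u = t
        · subst hut
          have hgd : ((pvFind k p (p.getD u u)).1.insert u (pvFind k p (p.getD u u)).2).getD u u
              = (pvFind k p (p.getD u u)).2 := by simp
          rw [hgd, hval]
          refine ⟨pvRootF_mem hin hu (show pvRootF (k+1) p u = some r by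
            simp only [pvRootF, if_neg hstep]; exact h), ?_⟩
          right
          have h1 : rk r ≤ rk (p.getD u u) := pvRootF_rk_le hin hpt h
          rcases (hin u hu).2 with h2 | h2
          · exact absurd h2 hstep
          · omega
        · have hgd : ((pvFind k p (p.getD t t)).1.insert t (pvFind k p (p.getD t t)).2).getD u u
              = (pvFind k p (p.getD t t)).1.getD u u := by
            simp [PySem.Dict.getD_insert, hut]
          rw [hgd]
          exact hinv1 u hu
      · intro m x s hx
        have hx1 := hpres1 m x s hx
        simp only [pvFind, if_neg hstep]
        rw [hval]
        exact pvRootF_insert_pres hroot1 hx1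

lemma pvRoot_pres_of_pres {ts : List String} {p p' : PySem.Dict String String}
    {rk rk' : String → Nat} (hin : pvInv ts p rk) (hin' : pvInv ts p' rk')
    (hpres : ∀ (m : Nat) (x s : String), pvRootF m p x = some s → pvRootF m p' x = some s)
    {x : String} (hx : x ∈ ts) : pvRoot ts p' x = pvRoot ts p x := by
  obtain ⟨r, hr⟩ := pvRoot_isSome hin hx
  obtain ⟨r', hr'⟩ := pvRoot_isSome hin' hx
  have hp := hpres _ x r hr
  rw [hr, hr']
  rw [pvRootF_det hr' hp]

lemma pvRootF_union_shift {q : PySem.Dict String String} {ra rb : String}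
    (hra : q.getD ra ra = ra) (hrb : q.getD rb rb = rb) (hne : ra ≠ rb) :
    ∀ {m : Nat} {x s : String}, pvRootF m q x = some s →
      pvRootF (m+1) (q.insert ra rb) x = some (if s = ra then rb else s) := by
  intro m
  induction m with
  | zero => intro x s h; simp [pvRootF] at h
  | succ m' ih =>
    intro x s h
    simp only [pvRootF] at h
    by_cases hstep : q.getD x x = x
    · rw [if_pos hstep] at h
      obtain rfl := Option.some_inj.mp h
      by_cases hxa : x = ra
      · subst hxa
        have hgd : (q.insert x rb).getD x x = rb := by simp
        have hgr : (q.insert x rb).getD rb rb = rb := by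
          simp [PySem.Dict.getD_insert, hrb]
        simp [pvRootF, hgd, Ne.symm hne, hgr]
      · have hgd : (q.insert ra rb).getD x x = x := by
          simp [PySem.Dict.getD_insert, hxa, hstep]
        simp [pvRootF, hgd, hxa]
    · rw [if_neg hstep] at h
      have hxa : x ≠ ra := by
        intro hxx; subst hxx; exact hstep hra
      have hgd : (q.insert ra rb).getD x x = q.getD x x := by
        simp [PySem.Dict.getD_insert, hxa]
      have hih := ih h
      simp only [pvRootF] at hih ⊢
      rw [hgd, if_neg hstep]
      exact hih

lemma pvRoot_step {ts : List String} {p : PySem.Dict String String} {rk : String → Nat}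
    (hin : pvInv ts p rk) {u : String} (hu : u ∈ ts) (hnr : p.getD u u ≠ u) :
    pvRoot ts p u = pvRoot ts p (p.getD u u) := by
  obtain ⟨r, hr⟩ := pvRoot_isSome hin hu
  have h2 : pvRootF ts.length p (p.getD u u) = some r := by
    have hr' := hr
    rw [pvRoot] at hr'
    simpa only [pvRootF, if_neg hnr] using hr'
  rw [hr, pvRoot, pvRootF_mono h2 (by omega)]

lemma pvInv_union {ts : List String} {q : PySem.Dict String String} {rk : String → Nat}
    (hin : pvInv ts q rk) {ra rb : String} (hrab : ra ∈ ts) (hrbb : rb ∈ ts)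
    (hra : q.getD ra ra = ra) (hrb : q.getD rb rb = rb) (hne : ra ≠ rb) :
    pvInv ts (q.insert ra rb)
      (fun x => if pvRoot ts q x = some rb then rk x else rk x + rk rb + 1) := by
  intro u hu
  by_cases hua : u = ra
  · subst hua
    have hgd : (q.insert u rb).getD u u = rb := by simp
    rw [hgd]
    refine ⟨hrbb, ?_⟩
    right
    have h1 : pvRoot ts q rb = some rb := by
      rw [pvRoot]; simp [pvRootF, hrb]
    have h2 : pvRoot ts q u = some u := by
      rw [pvRoot]; simp [pvRootF, hra]
    simp only [h1, h2, Option.some.injEq]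
    rw [if_pos trivial, if_neg hne]
    omega
  · have hgd : (q.insert ra rb).getD u u = q.getD u u := by
      simp [PySem.Dict.getD_insert, hua]
    rw [hgd]
    refine ⟨(hin u hu).1, ?_⟩
    rcases (hin u hu).2 with h2 | h2
    · exact Or.inl h2
    · right
      have hnr : q.getD u u ≠ u := by intro hh; rw [hh] at h2; omega
      have hcls : pvRoot ts q u = pvRoot ts q (q.getD u u) := pvRoot_step hin hu hnr
      simp only [hcls]
      split <;> omega

lemma pvUnion_spec {ts : List String} {p : PySem.Dict String String} {rk : String → Nat}
    (hin : pvInv ts p rk) {a b : String} (ha : a ∈ ts) (hb : b ∈ ts) :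
    ∃ rk', pvInv ts (pvUnion (ts.length + 1) p a b) rk' ∧
      ∀ x ∈ ts, pvRoot ts (pvUnion (ts.length + 1) p a b) x =
        if pvRoot ts p x = pvRoot ts p a then pvRoot ts p b else pvRoot ts p x := by
  obtain ⟨ra, hrA⟩ := pvRoot_isSome hin ha
  obtain ⟨hvalA, hinv1, hpres1⟩ := pvFind_spec (ts.length + 1) p a ra hin ha hrA
  set p1 := (pvFind (ts.length + 1) p a).1 with hp1
  have hroots1 : ∀ x ∈ ts, pvRoot ts p1 x = pvRoot ts p x :=
    fun x hx => pvRoot_pres_of_pres hin hinv1 hpres1 hx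
  obtain ⟨rbv, hrB1⟩ := pvRoot_isSome hinv1 hb
  have hrB : pvRoot ts p b = some rbv := by rw [← hroots1 b hb]; exact hrB1
  obtain ⟨hvalB, hinv2, hpres2⟩ := pvFind_spec (ts.length + 1) p1 b rbv hinv1 hb hrB1
  set p2 := (pvFind (ts.length + 1) p1 b).1 with hp2
  have hroots2 : ∀ x ∈ ts, pvRoot ts p2 x = pvRoot ts p x := by
    intro x hx
    rw [pvRoot_pres_of_pres hinv1 hinv2 hpres2 hx]
    exact hroots1 x hx
  by_cases hcase : ra = rbv
  · refine ⟨rk, ?_, ?_⟩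
    · simpa [pvUnion, ← hp1, ← hp2, hvalA, hvalB, hcase] using hinv2
    · intro x hx
      have hEq : pvUnion (ts.length + 1) p a b = p2 := by
        simp [pvUnion, ← hp1, ← hp2, hvalA, hvalB, hcase]
      rw [hEq, hroots2 x hx]
      split
      · rename_i hh
        rw [hh, hrA, hrB, hcase]
      · rfl
  · have hU : pvUnion (ts.length + 1) p a b = p2.insert ra rbv := by
      simp [pvUnion, ← hp1, ← hp2, hvalA, hvalB, hcase]
    have hraP : pvRootF 1 p ra = some ra := by
      simp [pvRootF, pvRootF_isRoot hrA]
    have hrbP : pvRootF 1 p rbv = some rbv := by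
      simp [pvRootF, pvRootF_isRoot hrB]
    have hra2 : p2.getD ra ra = ra := pvRootF_isRoot (hpres2 1 ra ra (hpres1 1 ra ra hraP))
    have hrb2 : p2.getD rbv rbv = rbv := pvRootF_isRoot (hpres2 1 rbv rbv (hpres1 1 rbv rbv hrbP))
    have hmemra : ra ∈ ts := pvRootF_mem hin ha hrA
    have hmemrb : rbv ∈ ts := pvRootF_mem hin hb hrB
    have hinv3 := pvInv_union hinv2 hmemra hmemrb hra2 hrb2 hcase
    refine ⟨_, by rw [hU]; exact hinv3, ?_⟩
    intro x hx
    obtain ⟨sx, hsx⟩ := pvRoot_isSome hinv2 hx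
    have hsxp : pvRoot ts p x = some sx := by rw [← hroots2 x hx]; exact hsx
    have hshift := pvRootF_union_shift hra2 hrb2 hcase hsx
    obtain ⟨s2, hs2⟩ := pvRoot_isSome hinv3 (t := x) hx
    have hs3 : s2 = (if sx = ra then rbv else sx) :=
      pvRootF_det hs2 hshift
    rw [hU, hs2, hs3, hsxp, hrA, hrB]
    by_cases hxa : sx = ra
    · simp [hxa]
    · simp [hxa]

lemma pvGet?_mk_map {f : String → String} :
    ∀ (l : List (String × String)) (x : String),
      (PySem.Dict.mk (l.map (fun kv => (kv.1, f kv.2)))).get? x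
        = ((PySem.Dict.mk l).get? x).map f := by
  intro l
  induction l with
  | nil => intro x; simp [PySem.Dict.get?]
  | cons kv rest ih =>
    intro x
    rw [List.map_cons, PySem.Dict.get?_mk_cons, PySem.Dict.get?_mk_cons]
    by_cases h : (kv.1 == x) = true
    · rw [if_pos h, if_pos h]; rfl
    · rw [if_neg h, if_neg h]; exact ih x

lemma pvRelabel_get? (c : PySem.Dict String String) (ra rb x : String) :
    (pvRelabel c ra rb).get? x = (c.get? x).map (fun v => if v = ra then rb else v) := by
  have := pvGet?_mk_map (f := fun v => if v = ra then rb else v) c.items x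
  simpa [pvRelabel] using this

def pvGlue (ts : List String) (p : PySem.Dict String String) (c : PySem.Dict String String) : Prop :=
  (∀ x ∈ ts, (c.get? x).isSome) ∧
  (∀ x ∈ ts, ∀ y ∈ ts, (pvRoot ts p x = pvRoot ts p y ↔ c.getD x x = c.getD y y))

lemma pvMerge_glue {ts : List String} {p c : PySem.Dict String String} {rk : String → Nat}
    (hin : pvInv ts p rk) (hg : pvGlue ts p c) {a b : String} (ha : a ∈ ts) (hb : b ∈ ts) :
    (∃ rk', pvInv ts (pvUnion (ts.length + 1) p a b) rk') ∧
      pvGlue ts (pvUnion (ts.length + 1) p a b) (pvMerge c a b) := by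
  obtain ⟨rk', hinv', hchar⟩ := pvUnion_spec hin ha hb
  have hcond : pvRoot ts p a = pvRoot ts p b ↔ c.getD a a = c.getD b b := hg.2 a ha b hb
  by_cases hc : c.getD a a = c.getD b b
  · -- the classes of a and b already coincide: B does nothing; A's roots are unchanged
    have hM : pvMerge c a b = c := by simp [pvMerge, hc]
    have hsame : ∀ z ∈ ts, pvRoot ts (pvUnion (ts.length + 1) p a b) z = pvRoot ts p z := by
      intro z hz
      rw [hchar z hz]
      split
      · rename_i hh
        rw [← hcond.mpr hc, ← hh]
      · rfl
    refine ⟨⟨rk', hinv'⟩, by rw [hM]; exact hg.1, ?_⟩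
    intro x hx y hy
    rw [hsame x hx, hsame y hy, hM]
    exact hg.2 x hx y hy
  · have hab : pvRoot ts p a ≠ pvRoot ts p b := fun hh => hc (hcond.mp hh)
    have hM : pvMerge c a b = pvRelabel c (c.getD a a) (c.getD b b) := by
      simp [pvMerge, hc]
    have hlab : ∀ z ∈ ts, (pvMerge c a b).getD z z
        = (if c.getD z z = c.getD a a then c.getD b b else c.getD z z) := by
      intro z hz
      obtain ⟨lz, hlz⟩ := Option.isSome_iff_exists.mp (hg.1 z hz)
      rw [hM, PySem.Dict.getD_eq_get?_getD, pvRelabel_get?, hlz]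
      simp [PySem.Dict.getD_eq_get?_getD, hlz]
    have hsomeM : ∀ x ∈ ts, ((pvMerge c a b).get? x).isSome := by
      intro x hx
      rw [hM, pvRelabel_get?]
      have := hg.1 x hx
      simp [Option.isSome_map]
      exact this 
    refine ⟨⟨rk', hinv'⟩, hsomeM, ?_⟩
    intro x hx y hy
    rw [hchar x hx, hchar y hy, hlab x hx, hlab y hy]
    have Hxy : pvRoot ts p x = pvRoot ts p y ↔ c.getD x x = c.getD y y := hg.2 x hx y hy
    have Hxa : pvRoot ts p x = pvRoot ts p a ↔ c.getD x x = c.getD a a := hg.2 x hx a ha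
    have Hxb : pvRoot ts p x = pvRoot ts p b ↔ c.getD x x = c.getD b b := hg.2 x hx b hb
    have Hya : pvRoot ts p y = pvRoot ts p a ↔ c.getD y y = c.getD a a := hg.2 y hy a ha
    have Hyb : pvRoot ts p y = pvRoot ts p b ↔ c.getD y y = c.getD b b := hg.2 y hy b hb
    by_cases h1 : pvRoot ts p x = pvRoot ts p a <;> by_cases h2 : pvRoot ts p y = pvRoot ts p a
    · simp [h1, h2, Hxa.mp h1, Hya.mp h2]
    · have h2' : ¬ c.getD y y = c.getD a a := fun hh => h2 (Hya.mpr hh)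
      simp only [if_pos h1, if_neg h2, if_pos (Hxa.mp h1), if_neg h2']
      constructor
      · intro hh; exact (Hyb.mp hh.symm).symm
      · intro hh; exact (Hyb.mpr hh.symm).symm
    · have h1' : ¬ c.getD x x = c.getD a a := fun hh => h1 (Hxa.mpr hh)
      simp only [if_neg h1, if_pos h2, if_neg h1', if_pos (Hya.mp h2)]
      constructor
      · intro hh; exact Hxb.mp hh
      · intro hh; exact Hxb.mpr hh
    · have h1' : ¬ c.getD x x = c.getD a a := fun hh => h1 (Hxa.mpr hh)
      have h2' : ¬ c.getD y y = c.getD a a := fun hh => h2 (Hya.mpr hh)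
      simp only [if_neg h1, if_neg h2, if_neg h1', if_neg h2']
      exact Hxy

lemma pvInner_glue {ts : List String} :
    ∀ (bs : List String) (a : String) (p c : PySem.Dict String String), a ∈ ts →
      (∃ rk, pvInv ts p rk) → pvGlue ts p c →
      (∃ rk', pvInv ts (bs.foldl
        (fun p b => if ts.contains b then pvUnion (ts.length + 1) p a b else p) p) rk') ∧
      pvGlue ts
        (bs.foldl (fun p b => if ts.contains b then pvUnion (ts.length + 1) p a b else p) p)
        (bs.foldl (fun c b => if ts.contains b then pvMerge c a b else c) c) := by
  intro bs
  induction bs with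
  | nil => intro a p c _ hin hg; exact ⟨hin, hg⟩
  | cons b rest ih =>
    intro a p c ha hin hg
    simp only [List.foldl_cons]
    by_cases hbmem : ts.contains b
    · rw [if_pos hbmem, if_pos hbmem]
      obtain ⟨rk, hinv⟩ := hin
      have hb : b ∈ ts := by simpa using hbmem
      obtain ⟨hin', hg'⟩ := pvMerge_glue hinv hg ha hb
      exact ih a _ _ ha hin' hg'
    · rw [if_neg hbmem, if_neg hbmem]
      exact ih a _ _ ha hin hg

lemma pvLoops_glue {ts : List String} :
    ∀ (edges : List (String × List String)) (p c : PySem.Dict String String),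
      (∃ rk, pvInv ts p rk) → pvGlue ts p c →
      (∃ rk', pvInv ts (edges.foldl
        (fun p al => if ts.contains al.1 then
            al.2.foldl (fun p b => if ts.contains b then pvUnion (ts.length + 1) p al.1 b else p) p
          else p) p) rk') ∧
      pvGlue ts (edges.foldl
        (fun p al => if ts.contains al.1 then
            al.2.foldl (fun p b => if ts.contains b then pvUnion (ts.length + 1) p al.1 b else p) p
          else p) p)
        (edges.foldl
        (fun c al => if ts.contains al.1 then
            al.2.foldl (fun c b => if ts.contains b then pvMerge c al.1 b else c) c
          else c) c) := by
  intro edges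
  induction edges with
  | nil => intro p c hin hg; exact ⟨hin, hg⟩
  | cons al rest ih =>
    intro p c hin hg
    simp only [List.foldl_cons]
    by_cases hamem : ts.contains al.1
    · rw [if_pos hamem, if_pos hamem]
      have ha : al.1 ∈ ts := by simpa using hamem
      obtain ⟨hin', hg'⟩ := pvInner_glue al.2 al.1 p c ha hin hg
      exact ih _ _ hin' hg'
    · rw [if_neg hamem, if_neg hamem]
      exact ih p c hin hg

def pvBStep (f : String → String) (g : PySem.Dict String (List String)) (t : String) :
    PySem.Dict String (List String) :=
  (if g.contains (f t) then g else g.insert (f t) []).modify (f t) [] (fun l => l ++ [t])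

def pvRepsAux (f : String → String) (acc : List String) (l : List String) : List String :=
  l.foldl (fun acc t => if acc.any (fun r => f r == f t) then acc else acc ++ [t]) acc

def pvG (f : String → String) (seen reps : List String) : PySem.Dict String (List String) :=
  PySem.Dict.mk (reps.map (fun r => (f r, seen.filter (fun x => f x == f r))))

lemma pvReps_sub {f : String → String} :
    ∀ (l acc : List String) (r : String), r ∈ pvRepsAux f acc l → r ∈ acc ∨ r ∈ l := by
  intro l
  induction l with
  | nil => intro acc r h; exact Or.inl h
  | cons t rest ih =>
    intro acc r h
    rw [pvRepsAux, List.foldl_cons] at h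
    rcases ih _ r h with h' | h'
    · by_cases hany : acc.any (fun r => f r == f t) = true
      · rw [if_pos hany] at h'; exact Or.inl h'
      · rw [if_neg hany] at h'
        rcases List.mem_append.mp h' with h'' | h''
        · exact Or.inl h''
        · simp at h''; subst h''; exact Or.inr List.mem_cons_self
    · exact Or.inr (List.mem_cons_of_mem _ h')

lemma pvReps_prefix {f : String → String} :
    ∀ (l acc : List String), ∃ suff, pvRepsAux f acc l = acc ++ suff := by
  intro l
  induction l with
  | nil => intro acc; exact ⟨[], by simp [pvRepsAux]⟩
  | cons t rest ih =>
    intro acc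
    rw [pvRepsAux, List.foldl_cons]
    by_cases hany : acc.any (fun r => f r == f t) = true
    · rw [if_pos hany]; exact ih acc
    · rw [if_neg hany]
      obtain ⟨suff, hs⟩ := ih (acc ++ [t])
      exact ⟨[t] ++ suff, by rw [pvRepsAux] at hs; rw [hs, List.append_assoc]⟩

lemma pvReps_cover {f : String → String} :
    ∀ (l acc : List String) (s : String), s ∈ l → ∃ r ∈ pvRepsAux f acc l, f r = f s := by
  intro l
  induction l with
  | nil => intro acc s h; simp at h
  | cons t rest ih =>
    intro acc s hs
    rw [pvRepsAux, List.foldl_cons]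
    rcases List.mem_cons.mp hs with heq | hs'
    · by_cases hany : acc.any (fun r => f r == f t) = true
      · rw [if_pos hany]
        obtain ⟨r, hrm, hrb⟩ := List.any_eq_true.mp hany
        obtain ⟨suff, hsuf⟩ := pvReps_prefix (f := f) rest acc
        rw [pvRepsAux] at hsuf
        exact ⟨r, by rw [hsuf]; exact List.mem_append_left _ hrm,
          by rw [heq]; exact eq_of_beq hrb⟩
      · rw [if_neg hany]
        obtain ⟨suff, hsuf⟩ := pvReps_prefix (f := f) rest (acc ++ [t])
        rw [pvRepsAux] at hsuf
        refine ⟨t, ?_, by rw [heq]⟩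
        rw [hsuf]
        exact List.mem_append_left _ (List.mem_append_right _ List.mem_cons_self)
    · exact ih _ s hs'

lemma pvG_get? {f : String → String} (seen : List String) :
    ∀ (reps : List String) (k : String),
      (pvG f seen reps).get? k
        = (reps.find? (fun r => f r == k)).map (fun r => seen.filter (fun x => f x == f r)) := by
  intro reps
  induction reps with
  | nil => intro k; simp [pvG, PySem.Dict.get?]
  | cons r rest ih =>
    intro k
    rw [pvG, List.map_cons, PySem.Dict.get?_mk_cons, List.find?_cons]
    by_cases h : (f r == k) = true
    · simp [h]
    · simp only [h, Bool.false_eq_true, ite_false]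
      exact ih k

lemma pvG_contains {f : String → String} (seen reps : List String) (k : String) :
    (pvG f seen reps).contains k = reps.any (fun r => f r == k) := by
  simp [pvG, PySem.Dict.contains, List.any_map]
  rfl

lemma pvBStep_pvG {f : String → String} (seen : List String) (t : String) :
    pvBStep f (pvG f seen (pvRepsAux f [] seen)) t
      = pvG f (seen ++ [t]) (pvRepsAux f [] (seen ++ [t])) := by
  have hcover : ∀ s ∈ seen, ∃ r ∈ pvRepsAux f [] seen, f r = f s :=
    fun s hs => pvReps_cover seen [] s hs
  have hreps' : pvRepsAux f [] (seen ++ [t])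
      = if (pvRepsAux f [] seen).any (fun r => f r == f t)
        then pvRepsAux f [] seen else pvRepsAux f [] seen ++ [t] := by
    rw [pvRepsAux, List.foldl_append]
    rfl
  set reps := pvRepsAux f [] seen with hreps
  rw [pvBStep, pvG_contains]
  by_cases hany : reps.any (fun r => f r == f t) = true
  · rw [if_pos hany, hreps', if_pos hany]
    have hfind : (reps.find? (fun r => f r == f t)).isSome := by
      rw [List.find?_isSome]
      exact List.any_eq_true.mp hany
    obtain ⟨r0, hr0⟩ := Option.isSome_iff_exists.mp hfind
    have hr0b : (f r0 == f t) = true := by simpa using List.find?_some hr0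
    have hr0eq : f r0 = f t := eq_of_beq hr0b
    rw [PySem.Dict.modify, PySem.Dict.getD_eq_get?_getD, pvG_get?, hr0]
    simp only [Option.map_some, Option.getD_some]
    have hcont : (pvG f seen reps).contains (f t) = true := by
      rw [pvG_contains]; exact hany
    apply PySem.Dict.ext
    rw [PySem.Dict.items_insert_of_contains _ _ hcont]
    show (List.map _ (reps.map _)) = _
    rw [List.map_map, pvG]
    apply List.map_congr_left
    intro r hr
    by_cases hfr : f r = f t
    · simp only [Function.comp]
      rw [if_pos (by simpa using hfr)]
      have hpred : (fun x => f x == f r0) = (fun x => f x == f r) := by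
        funext x; rw [hr0eq, hfr]
      rw [hpred]
      have : (seen ++ [t]).filter (fun x => f x == f r)
          = seen.filter (fun x => f x == f r) ++ [t] := by
        rw [List.filter_append]
        simp [hfr]
      rw [this, hfr]
    · simp only [Function.comp]
      rw [if_neg (by simpa using hfr)]
      have hb : (f t == f r) = false := by
        simp only [beq_eq_false_iff_ne, ne_eq]
        exact fun hh => hfr hh.symm
      have : (seen ++ [t]).filter (fun x => f x == f r)
          = seen.filter (fun x => f x == f r) := by
        simp [List.filter_append, hb]
      rw [this]
  · rw [if_neg hany, hreps', if_neg hany]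
    have hcont : (pvG f seen reps).contains (f t) = false := by
      rw [pvG_contains]
      exact Bool.not_eq_true _ ▸ hany
    rw [PySem.Dict.modify, PySem.Dict.getD_insert_self, PySem.Dict.insert_insert_self]
    apply PySem.Dict.ext
    rw [PySem.Dict.items_insert_of_not_contains _ _ hcont, pvG, pvG, List.map_append]
    congr 1
    · apply List.map_congr_left
      intro r hr
      have hfr : ¬ f r = f t := by
        intro hh
        exact hany (List.any_eq_true.mpr ⟨r, hr, by simpa using hh⟩)
      have hb : (f t == f r) = false := by
        simp only [beq_eq_false_iff_ne, ne_eq]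
        exact fun hh => hfr hh.symm
      have : (seen ++ [t]).filter (fun x => f x == f r)
          = seen.filter (fun x => f x == f r) := by
        simp [List.filter_append, hb]
      rw [this]
    · simp only [List.map_cons, List.map_nil]
      have h1 : seen.filter (fun x => f x == f t) = [] := by
        rw [List.filter_eq_nil_iff]
        intro s hs hb
        obtain ⟨r, hrm, hre⟩ := hcover s hs
        refine hany (List.any_eq_true.mpr ⟨r, hrm, ?_⟩)
        rw [hre]
        exact hb
      have : (seen ++ [t]).filter (fun x => f x == f t) = [t] := by
        simp [List.filter_append, h1]
      rw [this]
      simp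

lemma pvBucket_fold {f : String → String} :
    ∀ (rem seen : List String),
      rem.foldl (pvBStep f) (pvG f seen (pvRepsAux f [] seen))
        = pvG f (seen ++ rem) (pvRepsAux f [] (seen ++ rem)) := by
  intro rem
  induction rem with
  | nil => intro seen; simp
  | cons t rem' ih =>
    intro seen
    rw [List.foldl_cons, pvBStep_pvG seen t, ih (seen ++ [t])]
    simp

lemma pvBucket_values (f : String → String) (ts : List String) :
    (ts.foldl (pvBStep f) PySem.Dict.empty).values
      = (pvRepsAux f [] ts).map (fun r => ts.filter (fun x => f x == f r)) := by
  have h0 : pvG f [] (pvRepsAux f [] []) = PySem.Dict.empty := by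
    rfl
  have := pvBucket_fold (f := f) ts []
  rw [h0] at this
  rw [this]
  simp [pvG, PySem.Dict.values, List.map_map]

lemma pvReps_congr {f h : String → String} {ts : List String}
    (hiff : ∀ x ∈ ts, ∀ y ∈ ts, (f x = f y ↔ h x = h y)) :
    ∀ (l acc : List String), (∀ x ∈ l, x ∈ ts) → (∀ r ∈ acc, r ∈ ts) →
      pvRepsAux f acc l = pvRepsAux h acc l := by
  intro l
  induction l with
  | nil => intro acc _ _; rfl
  | cons t rest ih =>
    intro acc hl hacc
    rw [pvRepsAux, pvRepsAux, List.foldl_cons, List.foldl_cons]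
    have ht : t ∈ ts := hl t List.mem_cons_self
    have hcond : acc.any (fun r => f r == f t) = acc.any (fun r => h r == h t) := by
      by_cases hc : acc.any (fun r => f r == f t) = true
      · obtain ⟨r, hrm, hrb⟩ := List.any_eq_true.mp hc
        rw [hc]
        exact (List.any_eq_true.mpr ⟨r, hrm,
          by simpa using (hiff r (hacc r hrm) t ht).mp (by simpa using hrb)⟩).symm
      · rw [Bool.not_eq_true] at hc
        rw [hc]
        symm
        rw [← Bool.not_eq_true] at hc ⊢
        intro hc2
        obtain ⟨r, hrm, hrb⟩ := List.any_eq_true.mp hc2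
        exact hc (List.any_eq_true.mpr ⟨r, hrm,
          by simpa using (hiff r (hacc r hrm) t ht).mpr (by simpa using hrb)⟩)
    rw [hcond]
    by_cases hc : acc.any (fun r => h r == h t) = true
    · rw [if_pos hc]
      exact ih acc (fun x hx => hl x (List.mem_cons_of_mem _ hx)) hacc
    · rw [if_neg hc]
      refine ih (acc ++ [t]) (fun x hx => hl x (List.mem_cons_of_mem _ hx)) ?_
      intro r hr
      rcases List.mem_append.mp hr with h' | h'
      · exact hacc r h'
      · simp at h'; subst h'; exact ht

lemma pvGroupA_fold {ts : List String} {rk : String → Nat} {φ : String → Option String} :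
    ∀ (rem : List String) (p : PySem.Dict String String) (g : PySem.Dict String (List String)),
      pvInv ts p rk → (∀ x ∈ ts, pvRoot ts p x = φ x) → (∀ x ∈ rem, x ∈ ts) →
      (rem.foldl (fun (s : PySem.Dict String String × PySem.Dict String (List String)) t =>
        let fr := pvFind (ts.length + 1) s.1 t
        let g := if s.2.contains fr.2 then s.2 else s.2.insert fr.2 []
        (fr.1, g.modify fr.2 [] (fun l => l ++ [t]))) (p, g)).2
      = rem.foldl (pvBStep (fun t => (φ t).getD t)) g := by
  intro rem
  induction rem with
  | nil => intro p g _ _ _; rfl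
  | cons t rem' ih =>
    intro p g hin hphi hmem
    have ht : t ∈ ts := hmem t List.mem_cons_self
    obtain ⟨r, hr⟩ := pvRoot_isSome hin ht
    have hrF : pvRootF (ts.length + 1) p t = some r := hr
    obtain ⟨hval, hinv1, hpres1⟩ := pvFind_spec (ts.length + 1) p t r hin ht hrF
    have hkey : (φ t).getD t = r := by rw [← hphi t ht, hr]; rfl
    simp only [List.foldl_cons]
    rw [hval]
    have hg : pvBStep (fun t => (φ t).getD t) g t
        = (if g.contains r then g else g.insert r []).modify r [] (fun l => l ++ [t]) := by
      rw [pvBStep, hkey]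
    rw [hg]
    refine ih _ _ hinv1 ?_ (fun x hx => hmem x (List.mem_cons_of_mem _ hx))
    intro x hx
    rw [← hphi x hx]
    exact pvRoot_pres_of_pres hin hinv1 hpres1 hx

lemma pvGroupB_step (c : PySem.Dict String String) (g : PySem.Dict String (List String)) (t : String) :
    (g.setdefault (c.getD t t) []).modify (c.getD t t) [] (fun l => l ++ [t])
      = pvBStep (fun t => c.getD t t) g t := by
  rw [pvBStep]
  by_cases hc : g.contains (c.getD t t) = true
  · rw [PySem.Dict.setdefault_of_contains _ _ hc, if_pos hc]
  · rw [PySem.Dict.setdefault_of_not_contains _ _ (Bool.not_eq_true _ ▸ hc),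
      if_neg hc]

lemma pvInit_get? :
    ∀ (l : List String) (d : PySem.Dict String String) (x : String),
      (l.foldl (fun d t => d.insert t t) d).get? x = if x ∈ l then some x else d.get? x := by
  intro l
  induction l with
  | nil => intro d x; simp
  | cons t rest ih =>
    intro d x
    rw [List.foldl_cons, ih]
    by_cases hx : x ∈ rest
    · simp [hx, List.mem_cons]
    · rw [if_neg hx, PySem.Dict.get?_insert]
      by_cases hxt : x = t
      · subst hxt; simp [List.mem_cons]
      · simp [hxt, hx, List.mem_cons]

theorem pvMainEq (ts : List String) (syns : List (String × List String)) :
    find_optimal_topic_merge ts syns = find_optimal_topic_merge_alt ts syns := by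
  simp only [find_optimal_topic_merge, find_optimal_topic_merge_alt]
  -- the shared initial dict {t: t}
  have hgd0 : ∀ x, (ts.foldl (fun d t => d.insert t t) PySem.Dict.empty).getD x x = x := by
    intro x
    rw [PySem.Dict.getD_eq_get?_getD, pvInit_get?]
    by_cases h : x ∈ ts <;> simp [h, PySem.Dict.get?_empty]
  have hinv0 : pvInv ts (ts.foldl (fun d t => d.insert t t) PySem.Dict.empty) (fun _ => 0) :=
    fun t ht => ⟨by rw [hgd0]; exact ht, Or.inl (hgd0 t)⟩
  have hroot0 : ∀ x, pvRoot ts (ts.foldl (fun d t => d.insert t t) PySem.Dict.empty) x = some x := by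
    intro x
    rw [pvRoot]
    simp [pvRootF, hgd0]
  have hglue0 : pvGlue ts (ts.foldl (fun d t => d.insert t t) PySem.Dict.empty)
      (ts.foldl (fun d t => d.insert t t) PySem.Dict.empty) := by
    constructor
    · intro x hx
      rw [pvInit_get?]
      simp [hx]
    · intro x hx y hy
      rw [hroot0 x, hroot0 y, hgd0, hgd0]
      simp
  obtain ⟨⟨rkF, hinvF⟩, hglueF⟩ :=
    pvLoops_glue (ts := ts) (PySem.Dict.ofList syns).items _ _ ⟨_, hinv0⟩ hglue0
  set pF := (PySem.Dict.ofList syns).items.foldl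
    (fun p al => if ts.contains al.1 then
        al.2.foldl (fun p b => if ts.contains b then pvUnion (ts.length + 1) p al.1 b else p) p
      else p) (ts.foldl (fun d t => d.insert t t) PySem.Dict.empty) with hpF
  set cF := (PySem.Dict.ofList syns).items.foldl
    (fun c al => if ts.contains al.1 then
        al.2.foldl (fun c b => if ts.contains b then pvMerge c al.1 b else c) c
      else c) (ts.foldl (fun d t => d.insert t t) PySem.Dict.empty) with hcF
  -- both grouping loops are bucket folds
  have hA : (ts.foldl (fun (s : PySem.Dict String String × PySem.Dict String (List String)) t =>
      let fr := pvFind (ts.length + 1) s.1 t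
      let g := if s.2.contains fr.2 then s.2 else s.2.insert fr.2 []
      (fr.1, g.modify fr.2 [] (fun l => l ++ [t]))) (pF, PySem.Dict.empty)).2
      = ts.foldl (pvBStep (fun t => (pvRoot ts pF t).getD t)) PySem.Dict.empty :=
    pvGroupA_fold (φ := fun t => pvRoot ts pF t) ts pF PySem.Dict.empty hinvF
      (fun _ _ => rfl) (fun x hx => hx)
  have hBfun : (fun (g : PySem.Dict String (List String)) t =>
      let r := cF.getD t t
      (g.setdefault r []).modify r [] (fun l => l ++ [t]))
      = (fun g t => pvBStep (fun t => cF.getD t t) g t) := by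
    funext g t
    exact pvGroupB_step cF g t
  rw [hA, hBfun]
  -- the two key functions induce the same partition of ts
  have hiff : ∀ x ∈ ts, ∀ y ∈ ts,
      ((pvRoot ts pF x).getD x = (pvRoot ts pF y).getD y ↔ cF.getD x x = cF.getD y y) := by
    intro x hx y hy
    obtain ⟨rx, hrx⟩ := pvRoot_isSome hinvF hx
    obtain ⟨ry, hry⟩ := pvRoot_isSome hinvF hy
    have h1 := hglueF.2 x hx y hy
    rw [hrx, hry] at h1
    simp only [Option.some.injEq] at h1
    rw [hrx, hry]
    simpa using h1
  -- hence equal buckets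
  have hval1 := pvBucket_values (fun t => (pvRoot ts pF t).getD t) ts
  have hval2 := pvBucket_values (fun t => cF.getD t t) ts
  have hreps : pvRepsAux (fun t => (pvRoot ts pF t).getD t) [] ts
      = pvRepsAux (fun t => cF.getD t t) [] ts :=
    pvReps_congr hiff ts [] (fun x hx => hx) (by simp)
  have hvals : (ts.foldl (pvBStep (fun t => (pvRoot ts pF t).getD t)) PySem.Dict.empty).values
      = (ts.foldl (pvBStep (fun t => cF.getD t t)) PySem.Dict.empty).values := by
    rw [hval1, hval2, hreps]
    apply List.map_congr_left
    intro r hrm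
    have hr : r ∈ ts := by
      rcases pvReps_sub ts [] r (hreps ▸ hrm) with h | h
      · simp at h
      · exact h
    apply List.filter_congr
    intro x hx
    have hif := hiff x hx r hr
    by_cases h : (pvRoot ts pF x).getD x = (pvRoot ts pF r).getD r
    · have h2 := hif.mp h
      simp [h, h2]
    · have h2 : ¬ cF.getD x x = cF.getD r r := fun hh => h (hif.mpr hh)
      simp [h, h2]
  rw [hvals]

-- ===== VERDICT (by name: the statement is the Claim_ definition above) =====
theorem find_optimal_topic_merge_spec : Claim_equal_find_optimal_topic_merge := by
  intro topics topic_synonyms _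
  show find_optimal_topic_merge topics topic_synonyms = find_optimal_topic_merge_alt topics topic_synonyms
  exact pvMainEq topics topic_synonyms
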